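-- pv_equiv track=rewrite | github.com/prudhvirajn/quiet-feature-learning-in-algorithmic-tasks | code/train_feature_probes_across_compute.py | update_min
-- ===== SOURCE A (Python) =====
-- def update_min(sequence, op_index):
--     L = op_index // 2  # op1 is the first L tokens
--     start_times = sequence[:L]
--     finish_times = sequence[L:2*L]  # Not used in this function but kept for clarity
--
--     current_min = finish_times[0]
--     update_min = []
--
--     for idx in range(len(finish_times)):
--         if current_min > finish_times[idx]:
--             current_min = finish_times[idx]
--             update_min.append(1)
--         else:
--             update_min.append(0)
--
--     return update_min
-- ===== SOURCE B (Python) =====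
-- def update_min(sequence, op_index):
--     L = op_index // 2
--     finish_times = sequence[L:2*L]
--     prefix = [finish_times[0]]
--     for x in finish_times[1:]:
--         prefix.append(min(prefix[-1], x))
--     return [0] + [1 if b < a else 0 for a, b in zip(prefix, prefix[1:])]
-- ===== Notes on version B (the rewrite author's own statement) =====
-- stated objective: idiomatic
-- what changed: Replaces A's fused scan carrying a current_min/flag state with two passes: build the running-minimum prefix table, then emit 1 exactly where adjacent prefix entries strictly drop.
import Mathlib
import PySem

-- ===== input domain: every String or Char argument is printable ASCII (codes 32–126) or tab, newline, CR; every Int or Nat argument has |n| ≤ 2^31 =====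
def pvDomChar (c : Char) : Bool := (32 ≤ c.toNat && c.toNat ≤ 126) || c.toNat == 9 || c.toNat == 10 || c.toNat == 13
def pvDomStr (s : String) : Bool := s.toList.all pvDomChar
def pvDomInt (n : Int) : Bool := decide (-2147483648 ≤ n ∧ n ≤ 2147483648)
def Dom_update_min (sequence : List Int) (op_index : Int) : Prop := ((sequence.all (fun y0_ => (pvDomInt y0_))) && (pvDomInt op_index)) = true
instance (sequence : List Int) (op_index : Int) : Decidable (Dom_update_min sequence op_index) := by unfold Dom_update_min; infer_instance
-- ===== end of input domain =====

-- B rebuilds the 0/1 marks from a running-minimum prefix table instead of A's fused scan (idiomatic two-pass decomposition).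

-- ===== PORT A =====
def update_min (sequence : List Int) (op_index : Int) : List Int :=
  let L := PySem.Int.floordiv op_index 2
  let finish_times := PySem.List.slice sequence (some L) (some (2*L))
  match PySem.List.pyGet? finish_times 0 with
  | none => []  -- Python raises IndexError here; excluded by Pre_update_min
  | some c0 =>
    ((PySem.List.pyRange 0 (finish_times.length : Int) 1).foldl
      (fun (st : Int × List Int) idx =>
        let v := PySem.List.pyGetD finish_times idx 0
        if st.1 > v then (v, st.2 ++ [(1 : Int)]) else (st.1, st.2 ++ [(0 : Int)]))
      (c0, [])).2

-- ===== PORT B =====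
def update_min_alt (sequence : List Int) (op_index : Int) : List Int :=
  let L := PySem.Int.floordiv op_index 2
  let finish_times := PySem.List.slice sequence (some L) (some (2*L))
  match PySem.List.pyGet? finish_times 0 with
  | none => []  -- Python raises IndexError here; excluded by Pre_update_min
  | some f0 =>
    let pre := (PySem.List.slice finish_times (some 1) none).foldl
      (fun acc x => acc ++ [min (PySem.List.pyGetD acc (-1) 0) x]) [f0]
    0 :: ((pre.zip (PySem.List.slice pre (some 1) none)).map
      (fun p => if p.2 < p.1 then (1 : Int) else 0))

-- ===== PRECONDITION & SPEC =====
-- Pre_ excludes exactly the inputs where finish_times is empty and Python raises IndexError.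
def Pre_update_min (sequence : List Int) (op_index : Int) : Prop :=
  2 ≤ op_index ∧ PySem.Int.floordiv op_index 2 < (sequence.length : Int)
instance (sequence : List Int) (op_index : Int) : Decidable (Pre_update_min sequence op_index) := by
  unfold Pre_update_min; infer_instance
def pvWitness_update_min : List Int × Int := ([3, 2, 5, 1], 4)
def Spec_update_min (sequence : List Int) (op_index : Int) (out : List Int) : Prop := out = update_min_alt sequence op_index
instance (sequence : List Int) (op_index : Int) (out : List Int) : Decidable (Spec_update_min sequence op_index out) := by unfold Spec_update_min; infer_instance

-- ===== CLAIM (what is proved, stated in full; the proofs are below) =====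
def Claim_equal_update_min : Prop := ∀ (sequence : List Int) (op_index : Int), Dom_update_min sequence op_index → Pre_update_min sequence op_index → Spec_update_min sequence op_index (update_min sequence op_index)

-- ===== LEMMAS AND PROOFS =====

-- the common mark sequence: 1 where a new strict running minimum appears
def pvSpec (m : Int) : List Int → List Int
  | [] => []
  | x :: xs => (if m > x then 1 else 0) :: pvSpec (min m x) xs

theorem pvA_fold (xs : List Int) : ∀ (m : Int) (out : List Int),
    (xs.foldl (fun (st : Int × List Int) v =>
        if st.1 > v then (v, st.2 ++ [(1 : Int)]) else (st.1, st.2 ++ [(0 : Int)]))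
      (m, out)).2 = out ++ pvSpec m xs := by
  induction xs with
  | nil => intro m out; simp [pvSpec]
  | cons x xs ih =>
    intro m out
    simp only [List.foldl_cons, pvSpec]
    by_cases h : m > x
    · simp only [if_pos h, ih]
      have : min m x = x := by omega
      simp [this]
    · simp only [if_neg h, ih]
      have : min m x = m := by omega
      simp [this]

theorem pvB_pre (xs : List Int) : ∀ (ys : List Int) (m : Int),
    xs.foldl (fun acc x => acc ++ [min (PySem.List.pyGetD acc (-1) 0) x]) (ys ++ [m])
      = ys ++ List.scanl min m xs := by
  induction xs with
  | nil => intro ys m; simp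
  | cons x xs ih =>
    intro ys m
    simp only [List.foldl_cons, PySem.List.pyGetD_neg_one_append_singleton, List.scanl_cons]
    rw [ih (ys ++ [m]) (min m x)]
    simp

theorem pvB_zip (xs : List Int) : ∀ (m : Int),
    ((List.scanl min m xs).zip ((List.scanl min m xs).tail)).map
      (fun p => if p.2 < p.1 then (1 : Int) else 0) = pvSpec m xs := by
  induction xs with
  | nil => intro m; simp [pvSpec]
  | cons x xs ih =>
    intro m
    obtain ⟨t, hs⟩ : ∃ t, List.scanl min (min m x) xs = min m x :: t := by
      cases xs with
      | nil => exact ⟨[], by simp⟩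
      | cons y ys => exact ⟨_, List.scanl_cons⟩
    rw [List.scanl_cons, hs, List.tail_cons, List.zip_cons_cons, List.map_cons]
    have htail : List.map (fun p => if p.2 < p.1 then (1 : Int) else 0)
        ((min m x :: t).zip t) = pvSpec (min m x) xs := by
      have h2 := ih (min m x)
      rw [hs] at h2
      simpa using h2
    rw [htail]
    simp only [pvSpec]
    congr 1
    by_cases h : m > x
    · rw [if_pos (by omega : min m x < m), if_pos h]
    · rw [if_neg (by omega : ¬ min m x < m), if_neg h]

-- ===== VERDICT (by name: the statement is the Claim_ definition above) =====
theorem update_min_spec : Claim_equal_update_min := by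
  intro sequence op_index _ hpre
  obtain ⟨hop, hlen⟩ := hpre
  have hLe : PySem.Int.floordiv op_index 2 = op_index / 2 := by
    rw [PySem.Int.floordiv, Int.fdiv_eq_ediv]; simp
  rw [hLe] at hlen
  unfold Spec_update_min update_min update_min_alt
  simp only [hLe]
  have hft_eq : PySem.List.slice sequence (some (op_index / 2)) (some (2 * (op_index / 2)))
      = (sequence.drop (op_index / 2).toNat).take ((2 * (op_index / 2)).toNat - (op_index / 2).toNat) :=
    PySem.List.slice_toNat sequence (by omega) (by omega)
  obtain ⟨f0, rest, hcons⟩ : ∃ f0 rest,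
      PySem.List.slice sequence (some (op_index / 2)) (some (2 * (op_index / 2))) = f0 :: rest := by
    have hne : PySem.List.slice sequence (some (op_index / 2)) (some (2 * (op_index / 2))) ≠ [] := by
      rw [hft_eq]
      simp only [ne_eq, List.take_eq_nil_iff, List.drop_eq_nil_iff]
      omega
    cases hc : PySem.List.slice sequence (some (op_index / 2)) (some (2 * (op_index / 2))) with
    | nil => exact absurd hc hne
    | cons a b => exact ⟨a, b, rfl⟩
  rw [hcons]
  have hget : PySem.List.pyGet? (f0 :: rest) (0 : Int) = some f0 := by
    simp [PySem.List.pyGet?, PySem.List.pyIdx?]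
  simp only [hget]
  -- A's index loop over range(len(ft)) is the fold over ft itself
  rw [PySem.List.foldl_pyRange_zero_pyGetD' (f0 :: rest) 0
        (fun (st : Int × List Int) v =>
          if st.1 > v then (v, st.2 ++ [(1 : Int)]) else (st.1, st.2 ++ [(0 : Int)]))
        (f0, []), pvA_fold, List.nil_append]
  -- B's prefix-minimum table is a scanl, its adjacent differences are pvSpec
  rw [PySem.List.slice_from_one, List.tail_cons,
      show [f0] = ([] : List Int) ++ [f0] from rfl, pvB_pre, List.nil_append,
      PySem.List.slice_from_one, pvB_zip]
  simp [pvSpec]
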